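-- pv_equiv track=rewrite | github.com/nishhc/CASPER | mashallah/plsworkipray.py | count_approx_matches
-- ===== SOURCE A (Python) =====
-- from typing import Tuple, Optional, List, Dict, Union
--
-- def hamming(a: str, b: str) -> int:
--     assert len(a) == len(b)
--     return sum(1 for x,y in zip(a,b) if x != y)
--
-- def count_approx_matches(hay: str, pattern: str, max_mm: int, extra_string: Optional[str]=None) -> int:
--     L = len(pattern)
--     n = 0
--     for i in range(0, len(hay) - L + 1):
--         if hamming(hay[i:i+L], pattern) <= max_mm:
--             n += 1
--     if extra_string:
--         p = extra_string
--         for i in range(0, len(hay) - L + 1):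
--             if hamming(hay[i:i+L], p) <= max_mm:
--                 n += 1
--     return n
-- ===== SOURCE B (Python) =====
-- def _count_windows(hay, pat, max_mm):
--     w = len(hay) - len(pat) + 1
--     if w <= 0:
--         return 0
--     mm = [0] * w
--     for j, c in enumerate(pat):
--         mm = [m + 1 if hay[i + j] != c else m for i, m in enumerate(mm)]
--     return sum(1 for m in mm if m <= max_mm)
--
-- def count_approx_matches(hay, pattern, max_mm, extra_string=None):
--     n = _count_windows(hay, pattern, max_mm)
--     if extra_string:
--         n += _count_windows(hay, extra_string, max_mm)
--     return n
-- ===== Notes on version B (the rewrite author's own statement) =====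
-- stated objective: alternative
-- what changed: B replaces A's per-window slice-and-rescan Hamming computation by a single column-wise pass that accumulates a mismatch-count array over all window alignments at once and then counts the entries within max_mm.
-- outside the precondition, e.g. on count_approx_matches('ab', 'abc', 1, 'b'): A returns 0, B returns 2
import Mathlib
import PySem

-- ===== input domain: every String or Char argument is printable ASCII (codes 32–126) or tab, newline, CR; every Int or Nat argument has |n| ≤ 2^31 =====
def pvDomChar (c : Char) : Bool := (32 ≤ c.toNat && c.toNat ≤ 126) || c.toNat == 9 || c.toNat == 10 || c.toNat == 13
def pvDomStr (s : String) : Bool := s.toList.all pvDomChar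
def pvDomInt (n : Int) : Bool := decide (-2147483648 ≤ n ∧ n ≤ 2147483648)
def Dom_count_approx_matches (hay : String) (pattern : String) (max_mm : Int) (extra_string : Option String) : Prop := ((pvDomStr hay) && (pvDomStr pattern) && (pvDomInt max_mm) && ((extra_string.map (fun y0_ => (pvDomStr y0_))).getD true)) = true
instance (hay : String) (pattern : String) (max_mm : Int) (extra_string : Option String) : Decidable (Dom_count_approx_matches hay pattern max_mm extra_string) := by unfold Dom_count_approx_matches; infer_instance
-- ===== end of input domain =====

-- B replaces A's per-window slice+hamming rescan by one column-wise accumulation of a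
-- mismatch-count array over all windows (objective: alternative, same asymptotic cost).

-- ===== PORT A =====
-- hamming(a, b) = sum(1 for x,y in zip(a,b) if x != y); its assert len(a)==len(b) can
-- only fire in the extra_string loop, which Pre_ excludes.
def pvHamming (a b : List Char) : Int :=
  (((a.zip b).countP (fun p => p.1 != p.2) : Nat) : Int)

def count_approx_matches (hay : String) (pattern : String) (max_mm : Int) (extra_string : Option String) : Int :=
  let L := pattern.toList.length
  let H := hay.toList
  -- range(0, len(hay) - L + 1): Python's range clamps a negative stop to empty, as does Nat subtraction here
  let n := (List.range (H.length + 1 - L)).foldl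
    (fun (n : Int) (i : Nat) => if pvHamming (PySem.List.slice H (some (i : Int)) (some ((i : Int) + (L : Int)))) pattern.toList ≤ max_mm then n + 1 else n) (0 : Int)
  match extra_string with
  | none => n
  | some p =>
    if p = "" then n   -- `if extra_string:` — falsy for the empty string
    else (List.range (H.length + 1 - L)).foldl
      (fun (n : Int) (i : Nat) => if pvHamming (PySem.List.slice H (some (i : Int)) (some ((i : Int) + (L : Int)))) p.toList ≤ max_mm then n + 1 else n) n

-- ===== PORT B =====
-- one column step: mm = [m + 1 if hay[i + j] != c else m for i, m in enumerate(mm)]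
-- (hay[i + j] is always in range here, so the total getD is exact)
def pvColStep (H : List Char) (mm : List Int) (cj : Char × Nat) : List Int :=
  (mm.zipIdx).map (fun mi => if H.getD (mi.2 + cj.2) ' ' != cj.1 then mi.1 + 1 else mi.1)

def pvCountWindows (H P : List Char) (max_mm : Int) : Int :=
  let w := H.length + 1 - P.length   -- w = len(hay) - len(pat) + 1; `if w <= 0: return 0`
  if w = 0 then 0
  else
    let mm := (P.zipIdx).foldl (pvColStep H) (List.replicate w (0 : Int))
    ((mm.countP (fun m => m ≤ max_mm) : Nat) : Int)

def count_approx_matches_alt (hay : String) (pattern : String) (max_mm : Int) (extra_string : Option String) : Int :=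
  let n := pvCountWindows hay.toList pattern.toList max_mm
  match extra_string with
  | none => n
  | some p => if p = "" then n else n + pvCountWindows hay.toList p.toList max_mm

-- ===== PRECONDITION & SPEC =====
-- Pre_ excludes a truthy extra_string whose length differs from pattern's while at least one
-- of the two fits in hay: there A either raises AssertionError in hamming (when pattern fits)
-- or, reusing pattern's length for the window range, silently scans zero windows for
-- extra_string although extra_string would fit. (When neither fits, both loops are empty on
-- both sides, so that case stays inside Pre_.)
def Pre_count_approx_matches (hay : String) (pattern : String) (max_mm : Int) (extra_string : Option String) : Prop :=
  (match extra_string with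
   | none => true
   | some p => (p == "") || (p.toList.length == pattern.toList.length)
       || (decide (hay.toList.length < pattern.toList.length)
            && decide (hay.toList.length < p.toList.length))) = true
instance (hay : String) (pattern : String) (max_mm : Int) (extra_string : Option String) : Decidable (Pre_count_approx_matches hay pattern max_mm extra_string) := by unfold Pre_count_approx_matches; infer_instance

def pvWitness_count_approx_matches : String × String × Int × Option String := ("abcab", "ab", 1, some "cb")

def Spec_count_approx_matches (hay : String) (pattern : String) (max_mm : Int) (extra_string : Option String) (out : Int) : Prop := out = count_approx_matches_alt hay pattern max_mm extra_string
instance (hay : String) (pattern : String) (max_mm : Int) (extra_string : Option String) (out : Int) : Decidable (Spec_count_approx_matches hay pattern max_mm extra_string out) := by unfold Spec_count_approx_matches; infer_instance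

-- ===== CLAIM (what is proved, stated in full; the proofs are below) =====
def Claim_equal_count_approx_matches : Prop := ∀ (hay : String) (pattern : String) (max_mm : Int) (extra_string : Option String), Dom_count_approx_matches hay pattern max_mm extra_string → Pre_count_approx_matches hay pattern max_mm extra_string → Spec_count_approx_matches hay pattern max_mm extra_string (count_approx_matches hay pattern max_mm extra_string)

-- ===== LEMMAS AND PROOFS =====

-- A's counting loop, shifted start (wrapper around PySem.List.foldl_count_if for a Prop test)
lemma pvFoldlCountIte (p : Nat → Prop) [DecidablePred p] (l : List Nat) (a : Int) :
    l.foldl (fun acc i => if p i then acc + 1 else acc) a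
      = a + ((l.countP (fun i => decide (p i)) : Nat) : Int) := by
  have h := PySem.List.foldl_count_if (fun i => decide (p i)) l a
  simpa using h

-- the mismatch column sum contributed by processed pattern entries, at window i
def pvColSum (H : List Char) (ps : List (Char × Nat)) (i : Nat) : Int :=
  (ps.map (fun cj => if H.getD (i + cj.2) ' ' != cj.1 then (1 : Int) else 0)).sum

lemma pvColStep_length (H : List Char) (mm : List Int) (cj : Char × Nat) :
    (pvColStep H mm cj).length = mm.length := by
  simp [pvColStep]

lemma pvColFold_length (H : List Char) (ps : List (Char × Nat)) (mm : List Int) :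
    (ps.foldl (pvColStep H) mm).length = mm.length := by
  induction ps generalizing mm with
  | nil => rfl
  | cons cj ps ih => simp [List.foldl_cons, ih, pvColStep_length]

lemma pvColFold_getElem (H : List Char) (ps : List (Char × Nat)) (mm : List Int)
    (i : Nat) (h : i < mm.length)
    (h' : i < (ps.foldl (pvColStep H) mm).length) :
    (ps.foldl (pvColStep H) mm)[i] = mm[i] + pvColSum H ps i := by
  induction ps generalizing mm with
  | nil => simp [pvColSum]
  | cons cj ps ih =>
    have hlen : i < (pvColStep H mm cj).length := by rwa [pvColStep_length]
    have hstep : (pvColStep H mm cj)[i] =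
        (if H.getD (i + cj.2) ' ' != cj.1 then mm[i] + 1 else mm[i]) := by
      simp [pvColStep, List.getElem_map, List.getElem_zipIdx]
    simp only [List.foldl_cons]
    rw [ih _ hlen (by simpa [pvColFold_length, pvColStep_length] using h')]
    rw [hstep]
    simp only [pvColSum, List.map_cons, List.sum_cons]
    split <;> ring

-- hamming on a window via drop: column view of processed entries equals pvHamming
lemma pvColSum_eq_ham (H : List Char) (P : List Char) (i k : Nat)
    (hb : i + k + P.length ≤ H.length) :
    pvColSum H (P.zipIdx k) i = pvHamming (H.drop (i + k)) P := by
  induction P generalizing k with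
  | nil => simp [pvColSum, pvHamming]
  | cons c P ih =>
    have hik : i + k < H.length := by simp at hb; omega
    have hdrop : H.drop (i + k) = H[i + k] :: H.drop (i + k + 1) :=
      List.drop_eq_getElem_cons hik
    have hk1 : i + (k + 1) = i + k + 1 := by omega
    have ihk := ih (k + 1) (by simp at hb ⊢; omega)
    rw [hk1] at ihk
    rw [List.zipIdx_cons]
    simp only [pvColSum, List.map_cons, List.sum_cons] at ihk ⊢
    rw [hdrop]
    simp only [pvHamming, List.zip_cons_cons, List.countP_cons]
    rw [List.getD_eq_getElem H ' ' hik]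
    rw [ihk]
    simp only [pvHamming]
    push_cast
    split <;> ring

-- hamming ignores the haystack tail beyond the pattern's length
lemma pvHamming_take (P G : List Char) (h : P.length ≤ G.length) :
    pvHamming (G.take P.length) P = pvHamming G P := by
  induction P generalizing G with
  | nil => simp [pvHamming]
  | cons c P ih =>
    cases G with
    | nil => simp at h
    | cons g G =>
      simp only [List.length_cons, List.take_succ_cons]
      simp only [pvHamming, List.zip_cons_cons, List.countP_cons]
      have := ih G (by simpa using h)
      simp only [pvHamming] at this
      push_cast [this]
      omega

-- the heart: A's window loop over any pattern P equals B's column count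
lemma pvWindows_eq (H P : List Char) (m : Int) :
    (List.range (H.length + 1 - P.length)).foldl
      (fun (n : Int) (i : Nat) => if pvHamming (PySem.List.slice H (some (i : Int)) (some ((i : Int) + (P.length : Int)))) P ≤ m then n + 1 else n) (0 : Int)
      = pvCountWindows H P m := by
  by_cases hw : H.length + 1 - P.length = 0
  · simp [hw, pvCountWindows]
  · have hPH : P.length ≤ H.length := by omega
    set w := H.length + 1 - P.length with hwdef
    rw [pvFoldlCountIte]
    have hmm : (P.zipIdx).foldl (pvColStep H) (List.replicate w (0 : Int))
        = (List.range w).map (fun i => pvHamming (H.drop i) P) := by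
      apply List.ext_getElem
      · simp [pvColFold_length]
      · intro i h1 h2
        have hiw : i < w := by simpa [pvColFold_length] using h1
        rw [pvColFold_getElem H _ _ i (by simpa using hiw) h1]
        rw [List.getElem_map, List.getElem_range]
        rw [List.getElem_replicate]
        have := pvColSum_eq_ham H P i 0 (by omega)
        simpa using this
    have hrhs : pvCountWindows H P m
        = (((List.range w).countP (fun i => decide (pvHamming (H.drop i) P ≤ m)) : Nat) : Int) := by
      simp only [pvCountWindows]
      rw [if_neg hw, hmm, List.countP_map]
      rfl
    rw [hrhs]
    have hcong : List.countP (fun (i : Nat) => decide (pvHamming (PySem.List.slice H (some (i : Int)) (some ((i : Int) + (P.length : Int)))) P ≤ m)) (List.range w)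
        = List.countP (fun i => decide (pvHamming (H.drop i) P ≤ m)) (List.range w) := by
      apply List.countP_congr
      intro i hi
      have hiw : i < w := List.mem_range.mp hi
      have hslice : PySem.List.slice H (some (i : Int)) (some ((i : Int) + (P.length : Int)))
          = (H.drop i).take P.length := by
        simpa using PySem.List.slice_natCast_add H i P.length
      have hlen : P.length ≤ (H.drop i).length := by simp; omega
      simp only [hslice, decide_eq_true_eq]
      rw [pvHamming_take P (H.drop i) hlen]
    rw [hcong, zero_add]

-- ===== VERDICT (by name: the statement is the Claim_ definition above) =====
theorem count_approx_matches_spec : Claim_equal_count_approx_matches := by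
  intro hay pattern max_mm extra_string _ hpre
  unfold Spec_count_approx_matches
  unfold count_approx_matches count_approx_matches_alt
  cases extra_string with
  | none =>
    simp only
    exact pvWindows_eq hay.toList pattern.toList max_mm
  | some p =>
    simp only
    by_cases hp : p = ""
    · simp only [if_pos hp]
      exact pvWindows_eq hay.toList pattern.toList max_mm
    · have hpre' : p = "" ∨ p.toList.length = pattern.toList.length ∨
          (hay.toList.length < pattern.toList.length ∧ hay.toList.length < p.toList.length) := by
        simpa [Pre_count_approx_matches, or_assoc] using hpre
      rcases hpre' with h | hlen | hshort
      · exact absurd h hp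
      · simp only [if_neg hp]
        rw [pvFoldlCountIte]
        rw [pvWindows_eq hay.toList pattern.toList max_mm]
        congr 1
        rw [← hlen]
        have := pvWindows_eq hay.toList p.toList max_mm
        rw [pvFoldlCountIte] at this
        simpa using this
      · -- neither pattern fits in hay: both loops are empty and both column counts are 0
        have hs : hay.length < pattern.length ∧ hay.length < p.length := by
          simpa using hshort
        have h1 : hay.length + 1 - pattern.length = 0 := by omega
        have h2 : hay.length + 1 - p.length = 0 := by omega
        simp [pvCountWindows, h1, h2]
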